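-- pv_equiv track=rewrite | github.com/meroton/git-toprepo | git_toprepo.py | join_submodule_url
-- ===== SOURCE A (Python) =====
-- Url = str
--
-- RawUrl = str
--
-- def join_submodule_url(parent: Url, other: RawUrl) -> Url:
--     if other.startswith("./") or other.startswith("../") or other == ".":
--         idx = parent.find("://")
--         scheme_end = idx + 3 if idx != -1 else idx + 1
--         scheme = parent[:scheme_end]
--         parent = parent[scheme_end:]
--         parent = parent.rstrip("/")
--         while True:
--             if other.startswith("/"):
--                 # Ignore double slash.
--                 other = other[1:]
--             elif other.startswith("./"):
--                 other = other[2:]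
--             elif other.startswith("../"):
--                 idx = parent.rfind("/")
--                 if idx != -1:
--                     parent = parent[:idx]
--                 else:
--                     # Too many '../', move it from other to parent.
--                     parent += "/.."
--                 other = other[3:]
--             else:
--                 break
--         if other in ("", "."):
--             ret = f"{scheme}{parent}"
--         else:
--             ret = f"{scheme}{parent}/{other}"
--     else:
--         ret = other
--     return ret
-- ===== SOURCE B (Python) =====
-- Url = str
-- RawUrl = str
--
-- def join_submodule_url(parent: Url, other: RawUrl) -> Url:
--     if not (other.startswith("./") or other.startswith("../") or other == "."):
--         return other
--     idx = parent.find("://")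
--     scheme_end = idx + 3 if idx != -1 else idx + 1
--     scheme = parent[:scheme_end]
--     parent = parent[scheme_end:].rstrip("/")
--     segs = other.split("/")
--     remaining = segs[-1]
--     for i, seg in enumerate(segs[:-1]):
--         if seg == "" or seg == ".":
--             continue
--         elif seg == "..":
--             j = parent.rfind("/")
--             parent = parent[:j] if j != -1 else parent + "/.."
--         else:
--             remaining = "/".join(segs[i:])
--             break
--     if remaining in ("", "."):
--         return f"{scheme}{parent}"
--     return f"{scheme}{parent}/{remaining}"
-- ===== Notes on version B (the rewrite author's own statement) =====
-- stated objective: alternative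
-- what changed: Replaces A's char-by-char while loop that repeatedly strips '/', './', '../' prefixes off the string by a single pass over other.split('/'): empty and '.' segments are skipped, '..' segments shorten the parent, and the first real segment breaks with the joined remainder; the last segment is never treated as an up-level, matching A.
import Mathlib
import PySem

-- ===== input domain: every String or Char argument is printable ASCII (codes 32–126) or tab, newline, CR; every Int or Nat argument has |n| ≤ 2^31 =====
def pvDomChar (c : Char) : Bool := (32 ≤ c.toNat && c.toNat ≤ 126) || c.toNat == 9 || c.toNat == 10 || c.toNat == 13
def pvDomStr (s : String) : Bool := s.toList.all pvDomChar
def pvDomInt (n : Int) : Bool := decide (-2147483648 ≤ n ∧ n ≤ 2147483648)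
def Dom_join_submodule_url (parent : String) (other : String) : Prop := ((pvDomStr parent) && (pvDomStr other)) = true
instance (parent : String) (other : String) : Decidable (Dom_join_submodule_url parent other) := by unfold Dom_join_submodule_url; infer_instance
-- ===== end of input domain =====

-- B replaces A's char-by-char while loop by one pass over other.split('/'), same result; objective: simpler decomposition.

-- exact port of str.rstrip("/") (used by both sources): drop trailing '/' characters
def rstripSlashes (cs : List Char) : List Char :=
  (cs.reverse.dropWhile (· == '/')).reverse

-- ===== PORT A =====
-- parent-shortening step of A's '../' branch (rfind + parent[:idx], else parent += "/..")
def upParentA (parent : List Char) : List Char :=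
  let idx := PySem.Chars.rfind parent ['/']
  if idx ≠ -1 then PySem.List.slice parent none (some idx) else parent ++ ['/', '.', '.']

-- A's 'while True' loop: repeatedly strip '/', './', '../' from the front of other
-- (other[k:] on a list with k ≥ 0 is PySem.List.slice … (some k) none)
def joinLoopA (parent other : List Char) : List Char × List Char :=
  if PySem.Chars.startswith other ['/'] then
    joinLoopA parent (PySem.List.slice other (some 1) none)
  else if PySem.Chars.startswith other ['.', '/'] then
    joinLoopA parent (PySem.List.slice other (some 2) none)
  else if PySem.Chars.startswith other ['.', '.', '/'] then
    joinLoopA (upParentA parent) (PySem.List.slice other (some 3) none)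
  else (parent, other)
termination_by other.length
decreasing_by
  · have h := ((PySem.Chars.startswith_iff other ['/']).mp (by assumption)).length_le
    simp only [PySem.List.slice_from other (by omega : (0:Int) ≤ 1)]
    simp at h ⊢; omega
  · have h := ((PySem.Chars.startswith_iff other ['.', '/']).mp (by assumption)).length_le
    simp only [PySem.List.slice_from other (by omega : (0:Int) ≤ 2)]
    simp at h ⊢; omega
  · have h := ((PySem.Chars.startswith_iff other ['.', '.', '/']).mp (by assumption)).length_le
    simp only [PySem.List.slice_from other (by omega : (0:Int) ≤ 3)]
    simp at h ⊢; omega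

def join_submodule_url (parent : String) (other : String) : String :=
  let o := other.toList
  if PySem.Chars.startswith o ['.', '/'] || PySem.Chars.startswith o ['.', '.', '/']
      || decide (o = ['.']) then
    let p := parent.toList
    let idx := PySem.Chars.find p [':', '/', '/']
    let scheme_end := if idx ≠ -1 then idx + 3 else idx + 1
    let scheme := PySem.List.slice p none (some scheme_end)
    let p1 := PySem.List.slice p (some scheme_end) none
    let p2 := rstripSlashes p1
    let res := joinLoopA p2 o
    if res.2 = [] ∨ res.2 = ['.'] then String.mk (scheme ++ res.1)
    else String.mk (scheme ++ res.1 ++ '/' :: res.2)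
  else other

-- ===== PORT B =====
-- parent-shortening step of B's '..' segment (same rfind logic as the Python)
def upParentB (parent : List Char) : List Char :=
  let j := PySem.Chars.rfind parent ['/']
  if j ≠ -1 then PySem.List.slice parent none (some j) else parent ++ ['/', '.', '.']

-- B's 'for seg in segs[:-1]' loop with break; the single remaining segment is segs[-1];
-- the break returns '/'.join(segs[i:]) (= List.intercalate ['/'])
def segLoopB (parent : List Char) (segs : List (List Char)) : List Char × List Char :=
  match segs with
  | [] => (parent, [])               -- unreachable: split('/') is never empty
  | [last] => (parent, last)
  | seg :: next :: rest =>
    if seg = [] ∨ seg = ['.'] then segLoopB parent (next :: rest)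
    else if seg = ['.', '.'] then segLoopB (upParentB parent) (next :: rest)
    else (parent, List.intercalate ['/'] (seg :: next :: rest))

def join_submodule_url_alt (parent : String) (other : String) : String :=
  let o := other.toList
  if ¬ (PySem.Chars.startswith o ['.', '/'] || PySem.Chars.startswith o ['.', '.', '/']
      || decide (o = ['.'])) then other
  else
    let p := parent.toList
    let idx := PySem.Chars.find p [':', '/', '/']
    let scheme_end := if idx ≠ -1 then idx + 3 else idx + 1
    let scheme := PySem.List.slice p none (some scheme_end)
    let p1 := PySem.List.slice p (some scheme_end) none
    let p2 := rstripSlashes p1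
    let segs := List.splitOn '/' o        -- other.split('/')
    let res := segLoopB p2 segs
    if res.2 = [] ∨ res.2 = ['.'] then String.mk (scheme ++ res.1)
    else String.mk (scheme ++ res.1 ++ '/' :: res.2)

-- ===== PRECONDITION & SPEC =====
def Spec_join_submodule_url (parent : String) (other : String) (out : String) : Prop := out = join_submodule_url_alt parent other
instance (parent : String) (other : String) (out : String) : Decidable (Spec_join_submodule_url parent other out) := by unfold Spec_join_submodule_url; infer_instance

-- ===== CLAIM (what is proved, stated in full; the proofs are below) =====
def Claim_equal_join_submodule_url : Prop := ∀ (parent : String) (other : String), Dom_join_submodule_url parent other → Spec_join_submodule_url parent other (join_submodule_url parent other)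

-- ===== LEMMAS AND PROOFS =====

lemma up_eq : upParentA = upParentB := rfl

lemma startswith_false {p s : List Char} (h : ¬ (p <+: s)) :
    PySem.Chars.startswith s p = false := by
  rw [Bool.eq_false_iff]
  intro hc
  exact h ((PySem.Chars.startswith_iff s p).mp hc)

lemma intercalate_cons_ne_nil (seg : List Char) (x : Char) (r : List (List Char)) (h : r ≠ []) :
    List.intercalate [x] (seg :: r) = seg ++ x :: List.intercalate [x] r := by
  cases r with
  | nil => simp at h
  | cons a t => simp [List.intercalate, List.intersperse]

lemma noSlash_splitOn (o : List Char) : ∀ s ∈ List.splitOn '/' o, '/' ∉ s := by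
  induction o with
  | nil => simp [List.splitOn]
  | cons c t ih =>
    intro s hs
    rw [List.splitOn, List.splitOnP_cons] at hs
    by_cases hc : c = '/'
    · simp [hc] at hs
      rcases hs with h | h
      · simp [h]
      · exact ih s h
    · simp [hc] at hs
      rcases hrest : List.splitOnP (fun x => x == '/') t with _ | ⟨a, r⟩
      · exact absurd hrest (List.splitOnP_ne_nil _ _)
      · rw [hrest] at hs
        simp at hs
        rcases hs with h | h
        · subst h
          have ha : '/' ∉ a := ih a (by rw [List.splitOn, hrest]; simp)
          simp [ha]
          intro hcc; exact hc hcc.symm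
        · exact ih s (by rw [List.splitOn, hrest]; simp [h])

-- step A's loop once on an input that starts with a full segment + '/'
lemma joinLoopA_unfold (p o : List Char) :
    joinLoopA p o =
      if PySem.Chars.startswith o ['/'] then
        joinLoopA p (PySem.List.slice o (some 1) none)
      else if PySem.Chars.startswith o ['.', '/'] then
        joinLoopA p (PySem.List.slice o (some 2) none)
      else if PySem.Chars.startswith o ['.', '.', '/'] then
        joinLoopA (upParentA p) (PySem.List.slice o (some 3) none)
      else (p, o) := by
  rw [joinLoopA]

-- the heart of the equivalence: A's stripping loop over the joined string
-- equals B's one pass over the segment list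
lemma prefix_one {c : Char} {t : List Char} (h : ['/'] <+: c :: t) : c = '/' := by
  rw [List.cons_prefix_cons] at h
  exact h.1.symm

lemma prefix_two {c d : Char} {t : List Char} (h : ['.', '/'] <+: c :: d :: t) :
    c = '.' ∧ d = '/' := by
  rw [List.cons_prefix_cons] at h
  obtain ⟨h1, h2⟩ := h
  rw [List.cons_prefix_cons] at h2
  exact ⟨h1.symm, h2.1.symm⟩

lemma prefix_three {c d e : Char} {t : List Char} (h : ['.', '.', '/'] <+: c :: d :: e :: t) :
    c = '.' ∧ d = '.' ∧ e = '/' := by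
  rw [List.cons_prefix_cons] at h
  obtain ⟨h1, h2⟩ := h
  rw [List.cons_prefix_cons] at h2
  obtain ⟨h2, h3⟩ := h2
  rw [List.cons_prefix_cons] at h3
  exact ⟨h1.symm, h2.symm, h3.1.symm⟩

-- none of A's three loop guards fires on a first segment that B's loop breaks at
lemma no_guard_on_break (seg I : List Char) (hseg : '/' ∉ seg) (h0 : seg ≠ [])
    (h1 : seg ≠ ['.']) (h2 : seg ≠ ['.', '.']) :
    ¬ (['/'] <+: seg ++ '/' :: I) ∧ ¬ (['.', '/'] <+: seg ++ '/' :: I)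
      ∧ ¬ (['.', '.', '/'] <+: seg ++ '/' :: I) := by
  rcases seg with _ | ⟨c, _ | ⟨d, _ | ⟨e, t⟩⟩⟩
  · exact absurd rfl h0
  · have hc : c ≠ '/' := fun h => hseg (by simp [h])
    simp only [List.cons_append, List.nil_append]
    refine ⟨fun h => hc (prefix_one h), fun h => ?_, fun h => ?_⟩
    · exact h1 (by rw [(prefix_two h).1])
    · have := (List.cons_prefix_cons.mp (List.cons_prefix_cons.mp h).2).1
      simp at this
  · have hc : c ≠ '/' := fun h => hseg (by simp [h])
    have hd : d ≠ '/' := fun h => hseg (by simp [h])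
    simp only [List.cons_append, List.nil_append]
    refine ⟨fun h => hc (prefix_one h), fun h => hd (prefix_two h).2, fun h => ?_⟩
    obtain ⟨e1, e2, -⟩ := prefix_three h
    exact h2 (by rw [e1, e2])
  · have hc : c ≠ '/' := fun h => hseg (by simp [h])
    have hd : d ≠ '/' := fun h => hseg (by simp [h])
    have he : e ≠ '/' := fun h => hseg (by simp [h])
    simp only [List.cons_append, List.nil_append]
    exact ⟨fun h => hc (prefix_one h), fun h => hd (prefix_two h).2,
      fun h => he (prefix_three h).2.2⟩

-- the heart of the equivalence: A's stripping loop over the joined string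
-- equals B's one pass over the segment list
lemma loop_eq (segs : List (List Char)) (p : List Char) (hne : segs ≠ [])
    (hs : ∀ s ∈ segs, '/' ∉ s) :
    joinLoopA p (List.intercalate ['/'] segs) = segLoopB p segs := by
  induction segs generalizing p with
  | nil => exact absurd rfl hne
  | cons seg rest ih =>
    have hseg : '/' ∉ seg := hs seg (by simp)
    cases rest with
    | nil =>
      -- last segment: A's loop stops at once, B returns it unchanged
      have hi : List.intercalate ['/'] [seg] = seg := by simp [List.intercalate]
      rw [hi, joinLoopA_unfold]
      rw [startswith_false (fun hp => hseg (hp.mem (by simp)))]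
      rw [startswith_false (fun hp => hseg (hp.mem (by simp)))]
      rw [startswith_false (fun hp => hseg (hp.mem (by simp)))]
      simp [segLoopB]
    | cons next rrest =>
      have hrne : (next :: rrest : List (List Char)) ≠ [] := by simp
      have hrs : ∀ s ∈ next :: rrest, '/' ∉ s := fun s h => hs s (by simp [h])
      rw [intercalate_cons_ne_nil seg '/' (next :: rrest) hrne]
      by_cases h0 : seg = [] ∨ seg = ['.']
      · -- '' or '.' segment: A strips 1 or 2 chars, B skips
        rcases h0 with h0 | h0 <;> subst h0 <;> rw [joinLoopA_unfold] <;>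
          simp only [List.cons_append, List.nil_append]
        · rw [show PySem.Chars.startswith ('/' :: List.intercalate ['/'] (next :: rrest)) ['/'] = true from
            (PySem.Chars.startswith_iff _ _).mpr (by rw [List.cons_prefix_cons]; simp)]
          rw [PySem.List.slice_from _ (by omega : (0:Int) ≤ 1)]
          simp only [Int.toNat_one, List.drop_succ_cons, List.drop_zero]
          rw [ih p hrne hrs]
          simp [segLoopB]
        · rw [startswith_false (fun h => absurd (prefix_one h) (by decide))]
          rw [show PySem.Chars.startswith ('.' :: '/' :: List.intercalate ['/'] (next :: rrest)) ['.', '/'] = true from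
            (PySem.Chars.startswith_iff _ _).mpr (by rw [List.cons_prefix_cons, List.cons_prefix_cons]; simp)]
          rw [PySem.List.slice_from _ (by omega : (0:Int) ≤ 2)]
          rw [show ((2:Int).toNat) = 2 from rfl]
          simp only [List.drop_succ_cons, List.drop_zero]
          rw [ih p hrne hrs]
          simp [segLoopB]
      · push_neg at h0
        obtain ⟨hn0, hn1⟩ := h0
        by_cases h2 : seg = ['.', '.']
        · -- '..' segment: A strips "../" and shortens parent; so does B
          subst h2
          rw [joinLoopA_unfold]
          simp only [List.cons_append, List.nil_append]
          rw [startswith_false (fun h => absurd (prefix_one h) (by decide))]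
          rw [startswith_false (fun h => absurd (prefix_two h).2 (by decide))]
          rw [show PySem.Chars.startswith ('.' :: '.' :: '/' :: List.intercalate ['/'] (next :: rrest)) ['.', '.', '/'] = true from
            (PySem.Chars.startswith_iff _ _).mpr (by
              rw [List.cons_prefix_cons, List.cons_prefix_cons, List.cons_prefix_cons]; simp)]
          rw [PySem.List.slice_from _ (by omega : (0:Int) ≤ 3)]
          rw [show ((3:Int).toNat) = 3 from rfl]
          simp only [List.drop_succ_cons, List.drop_zero]
          rw [ih (upParentA p) hrne hrs]
          simp [segLoopB, up_eq]
        · -- a real segment: A's loop breaks, B joins the rest back together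
          obtain ⟨g1, g2, g3⟩ := no_guard_on_break seg (List.intercalate ['/'] (next :: rrest)) hseg hn0 hn1 h2
          rw [joinLoopA_unfold]
          rw [startswith_false g1, startswith_false g2, startswith_false g3]
          simp only [Bool.false_eq_true, if_false]
          rw [segLoopB]
          rw [if_neg (not_or.mpr ⟨hn0, hn1⟩), if_neg h2]
          rw [intercalate_cons_ne_nil _ '/' _ hrne]

lemma main_eq (p o : List Char) :
    joinLoopA p o = segLoopB p (List.splitOn '/' o) := by
  conv_lhs => rw [show o = List.intercalate ['/'] (List.splitOn '/' o) from
    (List.intercalate_splitOn o '/').symm]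
  exact loop_eq _ p (List.splitOnP_ne_nil _ _) (noSlash_splitOn o)

-- ===== VERDICT (by name: the statement is the Claim_ definition above) =====
theorem join_submodule_url_spec : Claim_equal_join_submodule_url := by
  intro parent other _
  unfold Spec_join_submodule_url join_submodule_url join_submodule_url_alt
  simp only [main_eq]
  by_cases h : (PySem.Chars.startswith other.toList ['.', '/']
      || PySem.Chars.startswith other.toList ['.', '.', '/']
      || decide (other.toList = ['.'])) = true <;> simp [h]
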